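-- pv_equiv track=rewrite | github.com/mabiiak/restaurant-orders | src/analyze_log.py | arnaldo_search
-- ===== SOURCE A (Python) =====
-- def filter_person(data, name):
--     data_person = []
--
--     for index in data:
--         if index[0] == name:
--             data_person.append(index)
--
--     return data_person
--
-- def count_orders(data_client):
--     count_orders = {}
--
--     for order in data_client:
--         if order[1] not in count_orders:
--             count_orders[order[1]] = 1
--         elif order[1] in count_orders:
--             count_orders[order[1]] += 1
--
--     return count_orders
--
-- def arnaldo_search(data):
--     data_client_arnaldo = filter_person(data, 'arnaldo')
--     arnaldo_orders = count_orders(data_client_arnaldo)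
--     arnaldo_count_orders = 0
--
--     for index in enumerate(arnaldo_orders):
--         if index[1] == 'hamburguer':
--             arnaldo_count_orders = arnaldo_orders[index[1]]
--
--     return arnaldo_count_orders
-- ===== SOURCE B (Python) =====
-- def arnaldo_search(data):
--     count = 0
--     for row in data:
--         if row[0] == 'arnaldo' and row[1] == 'hamburguer':
--             count += 1
--     return count
-- ===== Notes on version B (the rewrite author's own statement) =====
-- stated objective: simpler
-- what changed: Replaced the three-stage pipeline (filter the list, build a count dict, scan the dict keys for 'hamburguer') with a single pass keeping one integer counter.
import Mathlib
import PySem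

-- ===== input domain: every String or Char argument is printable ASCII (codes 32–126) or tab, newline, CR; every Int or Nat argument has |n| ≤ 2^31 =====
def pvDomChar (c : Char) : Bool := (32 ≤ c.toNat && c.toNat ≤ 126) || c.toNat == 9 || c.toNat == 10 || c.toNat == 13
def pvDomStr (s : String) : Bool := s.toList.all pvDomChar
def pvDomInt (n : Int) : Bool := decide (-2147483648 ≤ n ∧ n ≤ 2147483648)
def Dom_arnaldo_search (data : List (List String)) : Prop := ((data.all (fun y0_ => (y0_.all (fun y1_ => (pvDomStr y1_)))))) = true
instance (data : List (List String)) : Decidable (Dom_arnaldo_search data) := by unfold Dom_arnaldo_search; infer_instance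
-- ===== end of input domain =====

-- B replaces A's filter-list → count-dict → key-scan pipeline by a single pass with one integer counter (simpler).

-- ===== PORT A =====
def filter_person (data : List (List String)) (name : String) : List (List String) :=
  data.foldl (fun acc index =>
    if PySem.List.pyGetD index 0 "" == name then acc ++ [index] else acc) []

def count_orders (data_client : List (List String)) : PySem.Dict String Int :=
  data_client.foldl (fun d order =>
    if d.contains (PySem.List.pyGetD order 1 "") = false then
      d.insert (PySem.List.pyGetD order 1 "") 1
    else if d.contains (PySem.List.pyGetD order 1 "") then
      d.modify (PySem.List.pyGetD order 1 "") 0 (· + 1)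
    else d) PySem.Dict.empty

def arnaldo_search (data : List (List String)) : Int :=
  let data_client_arnaldo := filter_person data "arnaldo"
  let arnaldo_orders := count_orders data_client_arnaldo
  (PySem.List.enumerate arnaldo_orders.keys).foldl (fun acc index =>
    if index.2 == "hamburguer" then arnaldo_orders.getD index.2 0 else acc) 0

-- ===== PORT B =====
def arnaldo_search_alt (data : List (List String)) : Int :=
  data.foldl (fun count row =>
    if PySem.List.pyGetD row 0 "" == "arnaldo" && PySem.List.pyGetD row 1 "" == "hamburguer"
    then count + 1 else count) 0

-- ===== PRECONDITION & SPEC =====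
-- Pre_ excludes exactly the inputs where the Python raises IndexError: a row with no element
-- (index[0]) or a row starting with 'arnaldo' and having no second element (order[1]).
def Pre_arnaldo_search (data : List (List String)) : Prop :=
  ∀ row ∈ data, 1 ≤ row.length ∧ (PySem.List.pyGetD row 0 "" = "arnaldo" → 2 ≤ row.length)
instance (data : List (List String)) : Decidable (Pre_arnaldo_search data) := by
  unfold Pre_arnaldo_search; infer_instance
def pvWitness_arnaldo_search : List (List String) :=
  [["arnaldo", "hamburguer"], ["bia", "coxinha"], ["arnaldo", "pizza"]]

def Spec_arnaldo_search (data : List (List String)) (out : Int) : Prop := out = arnaldo_search_alt data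
instance (data : List (List String)) (out : Int) : Decidable (Spec_arnaldo_search data out) := by unfold Spec_arnaldo_search; infer_instance

-- ===== CLAIM (what is proved, stated in full; the proofs are below) =====
def Claim_equal_arnaldo_search : Prop := ∀ (data : List (List String)), Dom_arnaldo_search data → Pre_arnaldo_search data → Spec_arnaldo_search data (arnaldo_search data)

-- ===== LEMMAS AND PROOFS =====

-- A's dict-building loop is the always-`modify` counting loop over the second fields.
theorem count_orders_eq_modify_loop (l : List (List String)) :
    count_orders l =
      (l.map (fun r => PySem.List.pyGetD r 1 "")).foldl
        (fun d x => d.modify x 0 (· + 1)) PySem.Dict.empty := by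
  rw [List.foldl_map]
  unfold count_orders
  congr 1
  funext d order
  by_cases h : d.contains (PySem.List.pyGetD order 1 "")
  · simp [h]
  · simp only [Bool.not_eq_true] at h
    simp [h, PySem.Dict.modify, PySem.Dict.getD_of_not_contains d 0 h]

-- the last-assignment scan: the accumulated value is the branch value iff the key occurs.
theorem foldl_last_match (t : String) (v : Int) :
    ∀ (l : List (Int × String)) (init : Int),
      l.foldl (fun acc p => if p.2 == t then v else acc) init =
        if t ∈ l.map (·.2) then v else init := by
  intro l
  induction l with
  | nil => intro init; simp
  | cons p rest ih =>
    intro init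
    rw [List.foldl_cons, ih]
    by_cases h : p.2 = t
    · simp [h]
    · have hne : t ≠ p.2 := fun e => h e.symm
      split_ifs <;> simp_all [List.mem_cons]

theorem arnaldo_search_eq_count (data : List (List String)) :
    arnaldo_search data =
      ((filter_person data "arnaldo").map (fun r => PySem.List.pyGetD r 1 "")).count
        "hamburguer" := by
  unfold arnaldo_search
  dsimp only
  set ks := (filter_person data "arnaldo").map (fun r => PySem.List.pyGetD r 1 "") with hks
  set d := count_orders (filter_person data "arnaldo") with hd
  have hdm : d = ks.foldl (fun d x => d.modify x 0 (· + 1)) PySem.Dict.empty :=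
    count_orders_eq_modify_loop _
  have hdc : d = PySem.Dict.counter ks := by
    rw [hdm, PySem.Dict.counter_eq_foldl]
  have hgetD : d.getD "hamburguer" 0 = (ks.count "hamburguer" : Int) := by
    rw [hdc, PySem.Dict.getD_counter]
  have hkeys : "hamburguer" ∈ d.keys ↔ "hamburguer" ∈ ks := by
    rw [hdc, PySem.Dict.keys_counter]
    exact PySem.Set.mem_ofList ks "hamburguer"
  -- rewrite the scan body so its branch value is constant, then apply foldl_last_match
  have hbody : (fun (acc : Int) (index : Int × String) =>
        if index.2 == "hamburguer" then d.getD index.2 0 else acc) =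
      (fun acc index => if index.2 == "hamburguer" then d.getD "hamburguer" 0 else acc) := by
    funext acc index
    by_cases h : index.2 = "hamburguer"
    · simp [h]
    · simp [h]
  rw [hbody, foldl_last_match, PySem.List.map_snd_enumerate]
  by_cases hmem : "hamburguer" ∈ d.keys
  · simp [hmem, hgetD]
  · have hnot : "hamburguer" ∉ ks := fun h => hmem (hkeys.mpr h)
    have : ks.count "hamburguer" = 0 := List.count_eq_zero.mpr hnot
    simp [hmem, this]

theorem arnaldo_search_alt_eq_count (data : List (List String)) :
    arnaldo_search_alt data =
      ((filter_person data "arnaldo").map (fun r => PySem.List.pyGetD r 1 "")).count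
        "hamburguer" := by
  unfold arnaldo_search_alt filter_person
  rw [PySem.List.foldl_append_if, PySem.List.foldl_count_if]
  simp only [List.nil_append, List.count_eq_countP, List.countP_map, List.countP_filter,
    zero_add]
  congr 1
  apply List.countP_congr
  intro r _
  by_cases h0 : PySem.List.pyGetD r 0 "" = "arnaldo" <;>
    by_cases h1 : PySem.List.pyGetD r 1 "" = "hamburguer" <;>
      simp [h0, h1, Function.comp]

-- ===== VERDICT (by name: the statement is the Claim_ definition above) =====
theorem arnaldo_search_spec : Claim_equal_arnaldo_search := by
  intro data _ _
  unfold Spec_arnaldo_search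
  rw [arnaldo_search_eq_count, arnaldo_search_alt_eq_count]
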